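-- pv_equiv track=rewrite | github.com/jorzaiy/Threadloom | backend/persona_updater.py | _count_consecutive_quiet_turns
-- ===== SOURCE A (Python) =====
-- def _turn_pairs(history: list[dict]) -> list[tuple[str, str]]:
--     pairs: list[tuple[str, str]] = []
--     current_user = None
--     for item in history:
--         role = item.get('role')
--         content = item.get('content', '') or ''
--         if role == 'user':
--             current_user = content
--         elif role == 'assistant':
--             pairs.append((current_user or '', content))
--             current_user = None
--     return pairs
--
-- def _count_consecutive_quiet_turns(history: list[dict], name: str, aliases: list[str] | None = None) -> int:
--     tokens = [name] + list(aliases or [])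
--     quiet = 0
--     for user_text, assistant_text in reversed(_turn_pairs(history)):
--         if any(token and (token in user_text or token in assistant_text) for token in tokens):
--             break
--         quiet += 1
--     return quiet
-- ===== SOURCE B (Python) =====
-- def _count_consecutive_quiet_turns(history, name, aliases=None):
--     tokens = [name] + list(aliases or [])
--     current_user = None
--     quiet = 0
--     for item in history:
--         role = item.get('role')
--         content = item.get('content', '') or ''
--         if role == 'user':
--             current_user = content
--         elif role == 'assistant':
--             if any(t and (t in (current_user or '') or t in content) for t in tokens):
--                 quiet = 0
--             else:
--                 quiet += 1
--             current_user = None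
--     return quiet
-- ===== Notes on version B (the rewrite author's own statement) =====
-- stated objective: simpler
-- what changed: Replaces the build-pairs-list-then-reverse-scan-with-break structure by a single forward pass over history with a reset accumulator (quiet = 0 on a mention, else quiet + 1), so no intermediate pairs list and no reversal are needed.
import Mathlib
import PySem

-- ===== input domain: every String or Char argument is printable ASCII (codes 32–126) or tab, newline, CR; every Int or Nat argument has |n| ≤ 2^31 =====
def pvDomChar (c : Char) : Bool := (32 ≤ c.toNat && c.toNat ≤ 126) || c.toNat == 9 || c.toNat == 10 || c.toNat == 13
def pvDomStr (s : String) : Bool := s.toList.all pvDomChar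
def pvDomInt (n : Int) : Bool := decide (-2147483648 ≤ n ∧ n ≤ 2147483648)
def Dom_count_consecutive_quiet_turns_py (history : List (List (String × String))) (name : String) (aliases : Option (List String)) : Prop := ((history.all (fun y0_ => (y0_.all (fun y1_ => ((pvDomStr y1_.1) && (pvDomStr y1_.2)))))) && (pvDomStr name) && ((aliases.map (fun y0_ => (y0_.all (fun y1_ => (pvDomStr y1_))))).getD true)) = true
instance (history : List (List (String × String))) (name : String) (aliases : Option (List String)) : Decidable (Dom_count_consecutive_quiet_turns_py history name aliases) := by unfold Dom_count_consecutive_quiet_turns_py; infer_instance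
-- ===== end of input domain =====

-- B replaces A's build-pairs-then-reverse-scan-with-break by one forward pass with a reset accumulator (simpler).


-- ===== PORT A =====
-- `any(token and (token in user_text or token in assistant_text) for token in tokens)`
def pvMent (tokens : List String) (p : String × String) : Bool :=
  tokens.any (fun t => !(t == "") && (PySem.Str.isIn t p.1 || PySem.Str.isIn t p.2))

-- one step of _turn_pairs' loop: state = (pairs so far, current_user)
def pvStepA (st : List (String × String) × Option String) (item : List (String × String)) :
    List (String × String) × Option String :=
  let role := List.lookup "role" item
  let content := (List.lookup "content" item).getD ""
  if role == some "user" then (st.1, some content)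
  else if role == some "assistant" then (st.1 ++ [(st.2.getD "", content)], none)
  else st

-- the `for … in reversed(pairs): if any(...): break; quiet += 1` loop
def pvQuietA (tokens : List String) (q : Int) : List (String × String) → Int
  | [] => q
  | p :: rest => if pvMent tokens p then q else pvQuietA tokens (q + 1) rest

def count_consecutive_quiet_turns_py (history : List (List (String × String))) (name : String) (aliases : Option (List String)) : Int :=
  let tokens : List String := name :: (aliases.getD [])
  let pairs := (history.foldl pvStepA (([] : List (String × String)), (none : Option String))).1
  pvQuietA tokens 0 pairs.reverse

-- ===== PORT B =====
-- one step of Source B's single forward loop: state = (current_user, quiet)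
def pvStepB (tokens : List String) (st : Option String × Int) (item : List (String × String)) :
    Option String × Int :=
  let role := List.lookup "role" item
  let content := (List.lookup "content" item).getD ""
  if role == some "user" then (some content, st.2)
  else if role == some "assistant" then
    (none, if pvMent tokens (st.1.getD "", content) then 0 else st.2 + 1)
  else st

def count_consecutive_quiet_turns_py_alt (history : List (List (String × String))) (name : String) (aliases : Option (List String)) : Int :=
  let tokens : List String := name :: (aliases.getD [])
  (history.foldl (pvStepB tokens) ((none : Option String), (0 : Int))).2

-- ===== PRECONDITION & SPEC =====
def Spec_count_consecutive_quiet_turns_py (history : List (List (String × String))) (name : String) (aliases : Option (List String)) (out : Int) : Prop := out = count_consecutive_quiet_turns_py_alt history name aliases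
instance (history : List (List (String × String))) (name : String) (aliases : Option (List String)) (out : Int) : Decidable (Spec_count_consecutive_quiet_turns_py history name aliases out) := by unfold Spec_count_consecutive_quiet_turns_py; infer_instance

-- ===== CLAIM (what is proved, stated in full; the proofs are below) =====
def Claim_equal_count_consecutive_quiet_turns_py : Prop := ∀ (history : List (List (String × String))) (name : String) (aliases : Option (List String)), Dom_count_consecutive_quiet_turns_py history name aliases → Spec_count_consecutive_quiet_turns_py history name aliases (count_consecutive_quiet_turns_py history name aliases)

-- ===== LEMMAS AND PROOFS =====

-- the fresh pairs _turn_pairs produces from `history` given current_user = cu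
def pvPairs (cu : Option String) : List (List (String × String)) → List (String × String)
  | [] => []
  | item :: rest =>
    let role := List.lookup "role" item
    let content := (List.lookup "content" item).getD ""
    if role == some "user" then pvPairs (some content) rest
    else if role == some "assistant" then (cu.getD "", content) :: pvPairs none rest
    else pvPairs cu rest

-- B's reset step on the quiet counter, as a fold over pairs
def pvG (tokens : List String) (q : Int) (p : String × String) : Int :=
  if pvMent tokens p then 0 else q + 1

theorem pvQuietA_shift (tokens : List String) (l : List (String × String)) :
    ∀ q : Int, pvQuietA tokens q l = q + pvQuietA tokens 0 l := by
  induction l with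
  | nil => intro q; simp [pvQuietA]
  | cons p rest ih =>
    intro q
    simp only [pvQuietA]
    by_cases h : pvMent tokens p
    · simp [h]
    · simp [h, ih (q + 1), ih 1]; omega

theorem pvQuietA_rev_eq_foldl (tokens : List String) (l : List (String × String)) :
    pvQuietA tokens 0 l.reverse = List.foldl (pvG tokens) 0 l := by
  induction l using List.reverseRecOn with
  | nil => rfl
  | append_singleton l p ih =>
    simp only [List.reverse_append, List.reverse_cons, List.reverse_nil, List.nil_append,
      List.singleton_append, List.foldl_append, List.foldl_cons, List.foldl_nil]
    simp only [pvQuietA, pvG]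
    by_cases h : pvMent tokens p
    · simp [h]
    · simp [h, pvQuietA_shift tokens l.reverse 1, ih]
      omega

theorem pvFoldA_fst (h : List (List (String × String))) :
    ∀ (ps : List (String × String)) (cu : Option String),
      (List.foldl pvStepA (ps, cu) h).1 = ps ++ pvPairs cu h := by
  induction h with
  | nil => intro ps cu; simp [pvPairs]
  | cons item rest ih =>
    intro ps cu
    simp only [List.foldl_cons, pvStepA, pvPairs]
    by_cases hu : (List.lookup "role" item) == some "user"
    · simp [hu, ih]
    · by_cases ha : (List.lookup "role" item) == some "assistant"
      · simp [hu, ha, ih]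
      · simp [hu, ha, ih]

theorem pvFoldB_snd (tokens : List String) (h : List (List (String × String))) :
    ∀ (cu : Option String) (q : Int),
      (List.foldl (pvStepB tokens) (cu, q) h).2 = List.foldl (pvG tokens) q (pvPairs cu h) := by
  induction h with
  | nil => intro cu q; simp [pvPairs]
  | cons item rest ih =>
    intro cu q
    simp only [List.foldl_cons, pvStepB, pvPairs]
    by_cases hu : (List.lookup "role" item) == some "user"
    · simp [hu, ih]
    · by_cases ha : (List.lookup "role" item) == some "assistant"
      · simp [hu, ha, ih, pvG]
      · simp [hu, ha, ih]

-- ===== VERDICT (by name: the statement is the Claim_ definition above) =====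
theorem count_consecutive_quiet_turns_py_spec : Claim_equal_count_consecutive_quiet_turns_py := by
  intro history name aliases _
  unfold Spec_count_consecutive_quiet_turns_py
  unfold count_consecutive_quiet_turns_py count_consecutive_quiet_turns_py_alt
  rw [pvFoldA_fst, pvFoldB_snd, List.nil_append, pvQuietA_rev_eq_foldl]
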